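-- pv_equiv track=rewrite | github.com/johnmorgan2000/Daily_Cardio | 16_Mon/cardio.py | solution
-- ===== SOURCE A (Python) =====
-- def solution(steps):
--     x = 0
--     y = 0
--     if len(steps) == 10:
--         for step in steps:
--             if step == "n":
--                 y += 1
--             elif step == "s":
--                 y -= 1
--             elif step == "e":
--                 x += 1
--             elif step == "w":
--                 x -= 1
--         return isBackToStart(x, y)
--     else:
--         return False
--
-- def isBackToStart(x, y):
--     if x == 0 and y == 0:
--         return True
--     return False
-- ===== SOURCE B (Python) =====
-- def solution(steps):
--     if len(steps) != 10:
--         return False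
--     return steps.count("n") == steps.count("s") and steps.count("e") == steps.count("w")
-- ===== Notes on version B (the rewrite author's own statement) =====
-- stated objective: simpler
-- what changed: Replaces the 4-way branch coordinate accumulation plus the isBackToStart helper with direct count comparisons: n/s counts equal and e/w counts equal.
import Mathlib
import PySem

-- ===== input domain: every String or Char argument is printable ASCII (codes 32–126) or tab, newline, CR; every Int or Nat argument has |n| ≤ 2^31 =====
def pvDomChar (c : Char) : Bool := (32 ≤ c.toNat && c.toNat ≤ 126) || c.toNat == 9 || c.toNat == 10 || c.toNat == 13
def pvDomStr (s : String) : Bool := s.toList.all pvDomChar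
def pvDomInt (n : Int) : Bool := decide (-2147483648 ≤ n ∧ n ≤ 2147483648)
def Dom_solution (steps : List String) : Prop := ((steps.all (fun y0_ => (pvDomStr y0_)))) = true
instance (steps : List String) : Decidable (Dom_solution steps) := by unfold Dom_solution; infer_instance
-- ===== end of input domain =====

-- B replaces A's 4-way branch coordinate accumulation (and the isBackToStart helper) with
-- direct step-count comparisons; objective: simpler.

-- ===== PORT A =====
def isBackToStart (x y : Int) : Bool :=
  if x = 0 ∧ y = 0 then true else false

def solution (steps : List String) : Bool :=
  if steps.length = 10 then
    let p := steps.foldl (fun (p : Int × Int) step =>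
      if step == "n" then (p.1, p.2 + 1)
      else if step == "s" then (p.1, p.2 - 1)
      else if step == "e" then (p.1 + 1, p.2)
      else if step == "w" then (p.1 - 1, p.2)
      else p) (0, 0)
    isBackToStart p.1 p.2
  else false

-- ===== PORT B =====
def solution_alt (steps : List String) : Bool :=
  if steps.length ≠ 10 then false
  else decide (PySem.List.count steps "n" = PySem.List.count steps "s"
      ∧ PySem.List.count steps "e" = PySem.List.count steps "w")

-- ===== PRECONDITION & SPEC =====
def Spec_solution (steps : List String) (out : Bool) : Prop := out = solution_alt steps
instance (steps : List String) (out : Bool) : Decidable (Spec_solution steps out) := by unfold Spec_solution; infer_instance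

-- ===== CLAIM (what is proved, stated in full; the proofs are below) =====
def Claim_equal_solution : Prop := ∀ (steps : List String), Dom_solution steps → Spec_solution steps (solution steps)

-- ===== LEMMAS AND PROOFS =====
theorem solution_fold_counts (steps : List String) (x y : Int) :
    steps.foldl (fun (p : Int × Int) step =>
      if step == "n" then (p.1, p.2 + 1)
      else if step == "s" then (p.1, p.2 - 1)
      else if step == "e" then (p.1 + 1, p.2)
      else if step == "w" then (p.1 - 1, p.2)
      else p) (x, y)
    = (x + (steps.count "e" : Int) - (steps.count "w" : Int),
       y + (steps.count "n" : Int) - (steps.count "s" : Int)) := by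
  induction steps generalizing x y with
  | nil => simp
  | cons s t ih =>
    simp only [List.foldl_cons, List.count_cons]
    by_cases hn : s = "n" <;> by_cases hs : s = "s" <;> by_cases he : s = "e" <;>
      by_cases hw : s = "w" <;>
    simp_all <;> omega

-- ===== VERDICT (by name: the statement is the Claim_ definition above) =====
theorem solution_spec : Claim_equal_solution := by
  intro steps _
  show solution steps = solution_alt steps
  unfold solution solution_alt isBackToStart
  by_cases h : steps.length = 10
  · rw [if_pos h, solution_fold_counts]
    simp [PySem.List.count, Int.sub_eq_zero, Bool.and_comm, h]
  · simp [h]
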